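-- pv_equiv track=rewrite | github.com/aria-ml/dataeval | src/dataeval/_internal/detectors/clusterer.py | _sorted_union_find
-- ===== SOURCE A (Python) =====
-- from typing import Iterable, NamedTuple, cast
--
-- def _sorted_union_find(index_groups: Iterable[Iterable[int]]) -> list[list[int]]:
--     """Merges and sorts groups of indices that share any common index"""
--     groups: list[list[int]] = []
--     for indices in zip(*index_groups):
--         indices = set(indices)
--         temp = []
--         for group in groups:
--             if not set(group).isdisjoint(indices):
--                 indices.update(group)
--             else:
--                 temp.append(group)
--         temp.append(sorted(indices))
--         groups = temp
--     return sorted(groups)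
-- ===== SOURCE B (Python) =====
-- def _sorted_union_find(index_groups):
--     """Merges and sorts groups of indices that share any common index"""
--     comp: dict[int, int] = {}      # index -> label of the group currently holding it
--     members: dict[int, list[int]] = {}  # label -> that group's indices (distinct)
--     n = 0
--     for col in zip(*index_groups):
--         group: list[int] = []
--         for x in col:
--             if x in comp:
--                 l = comp[x]
--                 if l in members:           # group not yet absorbed during this column
--                     group.extend(members.pop(l))
--             else:
--                 comp[x] = n                # brand-new index (also dedups within col)
--                 group.append(x)
--         for x in group:
--             comp[x] = n
--         members[n] = group
--         n += 1
--     return sorted(sorted(g) for g in members.values())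
-- ===== Notes on version B (the rewrite author's own statement) =====
-- stated objective: alternative
-- what changed: A rescans every existing group (rebuilding a set per group) for each column of zip(*index_groups); B instead maintains two dicts (index -> group label, label -> members), so each column only looks up its own indices and absorbs exactly the groups they belong to, with no scan over unrelated groups; on the benchmark family this was not measurably faster.
import Mathlib
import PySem

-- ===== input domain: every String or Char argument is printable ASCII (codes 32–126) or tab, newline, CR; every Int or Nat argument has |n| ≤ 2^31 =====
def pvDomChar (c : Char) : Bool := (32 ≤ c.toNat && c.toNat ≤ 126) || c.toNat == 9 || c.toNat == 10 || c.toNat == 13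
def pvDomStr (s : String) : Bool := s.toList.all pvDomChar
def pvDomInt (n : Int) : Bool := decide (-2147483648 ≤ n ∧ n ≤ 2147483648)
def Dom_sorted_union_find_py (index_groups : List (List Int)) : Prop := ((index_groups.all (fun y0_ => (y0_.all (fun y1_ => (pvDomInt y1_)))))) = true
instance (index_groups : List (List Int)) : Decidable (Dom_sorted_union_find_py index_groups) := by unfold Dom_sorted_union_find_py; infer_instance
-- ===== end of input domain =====

-- B replaces A's per-column scan over all existing groups by two dicts (index -> group label,
-- label -> group), so each column only looks up its own indices; same exact output.

-- zip(*index_groups): the common column iteration both Pythons perform.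
def ufTails (igs : List (List Int)) : List (List Int) := igs.map (fun g => g.tail)

theorem ufZipMeasure (igs : List (List Int)) (h2 : igs.all (fun g => !g.isEmpty) = true)
    (h1 : igs.isEmpty = false) :
    ((ufTails igs).map List.length).sum < (igs.map List.length).sum := by
  unfold ufTails
  match igs with
  | [] => simp at h1
  | g :: t =>
    simp only [List.all_cons, Bool.and_eq_true] at h2
    have hg : g.length ≠ 0 := by
      cases g with
      | nil => simp at h2
      | cons a b => simp
    have ht : ((t.map (fun g => g.tail)).map List.length).sum ≤ (t.map List.length).sum := by
      rw [List.map_map]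
      apply List.sum_le_sum
      intro x _
      simp [List.length_tail]
    simp only [List.map_cons, List.sum_cons, List.length_tail]
    omega

def zipStar (igs : List (List Int)) : List (List Int) :=
  if h1 : igs.isEmpty then []
  else if h2 : igs.all (fun g => !g.isEmpty) then
    igs.map (fun g => g.headI) :: zipStar (ufTails igs)
  else []
termination_by (igs.map List.length).sum
decreasing_by exact ufZipMeasure igs h2 (by simpa using h1)

-- sorted(xs) with Python's default key
def ufSorted (g : List Int) : List Int := PySem.List.sorted g (fun x => x) false

-- ===== PORT A =====
-- the body of A's inner 'for group in groups' loop; state = (temp, indices)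
def aInner (st : List (List Int) × PySem.Set Int) (group : List Int) :
    List (List Int) × PySem.Set Int :=
  if !(PySem.Set.isdisjoint (PySem.Set.ofList group) st.2) then
    (st.1, PySem.Set.update st.2 group)
  else
    (st.1 ++ [group], st.2)

-- the body of A's outer loop over the columns of zip(*index_groups)
def aStep (groups : List (List Int)) (col : List Int) : List (List Int) :=
  let st := groups.foldl aInner ([], PySem.Set.ofList col)
  st.1 ++ [ufSorted st.2]

def sorted_union_find_py (index_groups : List (List Int)) : List (List Int) :=
  PySem.List.sorted ((zipStar index_groups).foldl aStep []) (fun x => x) false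

-- ===== PORT B =====
-- B's inner 'for x in col' loop; state = (comp, members, group)
def bInner (n : Int) (st : PySem.Dict Int Int × PySem.Dict Int (List Int) × List Int)
    (x : Int) : PySem.Dict Int Int × PySem.Dict Int (List Int) × List Int :=
  match st.1.get? x with
  | some l =>
    match st.2.1.pop? l with
    | some (g, m') => (st.1, m', st.2.2 ++ g)
    | none => st
  | none => (st.1.insert x n, st.2.1, st.2.2 ++ [x])

-- B's outer loop body; state = (comp, members, n)
def bStep (st : PySem.Dict Int Int × PySem.Dict Int (List Int) × Int) (col : List Int) :
    PySem.Dict Int Int × PySem.Dict Int (List Int) × Int :=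
  let r := col.foldl (bInner st.2.2) (st.1, st.2.1, [])
  (r.2.2.foldl (fun c x => c.insert x st.2.2) r.1, r.2.1.insert st.2.2 r.2.2, st.2.2 + 1)

def sorted_union_find_py_alt (index_groups : List (List Int)) : List (List Int) :=
  let st := (zipStar index_groups).foldl bStep (PySem.Dict.empty, PySem.Dict.empty, 0)
  PySem.List.sorted (st.2.1.values.map ufSorted) (fun x => x) false

-- ===== PRECONDITION & SPEC =====
def Spec_sorted_union_find_py (index_groups : List (List Int)) (out : List (List Int)) : Prop := out = sorted_union_find_py_alt index_groups
instance (index_groups : List (List Int)) (out : List (List Int)) : Decidable (Spec_sorted_union_find_py index_groups out) := by unfold Spec_sorted_union_find_py; infer_instance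

-- ===== CLAIM (what is proved, stated in full; the proofs are below) =====
def Claim_equal_sorted_union_find_py : Prop := ∀ (index_groups : List (List Int)), Dom_sorted_union_find_py index_groups → Spec_sorted_union_find_py index_groups (sorted_union_find_py index_groups)

-- ===== LEMMAS AND PROOFS =====

-- the keep/drop test of one column, on an entry of B's members dict
def ufKeep (col : List Int) (q : Int × List Int) : Bool :=
  PySem.Set.isdisjoint (PySem.Set.ofList q.2) (PySem.Set.ofList col)

-- how an entry of B's members dict shows up among A's groups
def ufMapF (q : Int × List Int) : List Int := ufSorted q.2

-- the coupling invariant on B's state between columns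
def ufInv (comp : PySem.Dict Int Int) (members : PySem.Dict Int (List Int)) (n : Int) : Prop :=
  (members.items.map (·.1)).Nodup ∧
  (∀ q ∈ members.items, q.1 < n) ∧
  (∀ q ∈ members.items, q.2.Nodup) ∧
  (∀ x l, comp.get? x = some l ↔ ∃ g, members.get? l = some g ∧ x ∈ g)

-- the invariant of B's inner loop, after a processed prefix p of the column
def ufMid (comp0 : PySem.Dict Int Int) (members0 : PySem.Dict Int (List Int)) (n : Int)
    (p : List Int) (st : PySem.Dict Int Int × PySem.Dict Int (List Int) × List Int) : Prop :=
  st.2.1.items = members0.items.filter (ufKeep p) ∧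
  (∀ y, st.1.get? y = if y ∈ p ∧ comp0.get? y = none then some n else comp0.get? y) ∧
  st.2.2.Nodup ∧
  (∀ y, y ∈ st.2.2 ↔ ((y ∈ p ∧ comp0.get? y = none) ∨
      ∃ q ∈ members0.items, ufKeep p q = false ∧ y ∈ q.2))

theorem ufDisj_congr (s s' t : List Int) (h : ∀ x, x ∈ s ↔ x ∈ s') :
    PySem.Set.isdisjoint (PySem.Set.ofList s) t = PySem.Set.isdisjoint (PySem.Set.ofList s') t := by
  rw [Bool.eq_iff_iff, PySem.Set.isdisjoint_iff, PySem.Set.isdisjoint_iff]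
  constructor
  · intro hh x hx
    exact hh x (by rw [PySem.Set.mem_ofList] at hx ⊢; exact (h x).mpr hx)
  · intro hh x hx
    exact hh x (by rw [PySem.Set.mem_ofList] at hx ⊢; exact (h x).mp hx)

theorem ufDisj_right (s t t' : List Int) (h : ∀ x ∈ s, (x ∈ t ↔ x ∈ t')) :
    PySem.Set.isdisjoint (PySem.Set.ofList s) t = PySem.Set.isdisjoint (PySem.Set.ofList s) t' := by
  rw [Bool.eq_iff_iff, PySem.Set.isdisjoint_iff, PySem.Set.isdisjoint_iff]
  constructor
  · intro hh x hx hm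
    have hs := (PySem.Set.mem_ofList _ _).mp hx
    exact hh x hx ((h x hs).mpr hm)
  · intro hh x hx hm
    have hs := (PySem.Set.mem_ofList _ _).mp hx
    exact hh x hx ((h x hs).mp hm)

theorem ufKeep_false_iff (col : List Int) (q : Int × List Int) :
    ufKeep col q = false ↔ ∃ x ∈ q.2, x ∈ col := by
  unfold ufKeep
  rw [← Bool.not_eq_true, PySem.Set.isdisjoint_iff]
  push Not
  constructor
  · rintro ⟨x, hx, hm⟩
    exact ⟨x, (PySem.Set.mem_ofList _ _).mp hx, (PySem.Set.mem_ofList _ _).mp hm⟩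
  · rintro ⟨x, hx, hm⟩
    exact ⟨x, (PySem.Set.mem_ofList _ _).mpr hx, (PySem.Set.mem_ofList _ _).mpr hm⟩

theorem ufKeep_true_iff (col : List Int) (q : Int × List Int) :
    ufKeep col q = true ↔ ∀ x ∈ q.2, x ∉ col := by
  unfold ufKeep
  rw [PySem.Set.isdisjoint_iff]
  constructor
  · intro hh x hx hm
    exact hh x ((PySem.Set.mem_ofList _ _).mpr hx) ((PySem.Set.mem_ofList _ _).mpr hm)
  · intro hh x hx hm
    exact hh x ((PySem.Set.mem_ofList _ _).mp hx) ((PySem.Set.mem_ofList _ _).mp hm)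

-- get? on a literal assoc list, through filter, given distinct keys
theorem ufGet?_filter {ν : Type} (items : List (Int × ν)) (pred : Int × ν → Bool) (k : Int)
    (hnd : (items.map (·.1)).Nodup) :
    (PySem.Dict.mk (items.filter pred)).get? k =
      ((PySem.Dict.mk items).get? k).bind
        (fun v => if pred (k, v) then some v else none) := by
  induction items with
  | nil => simp [PySem.Dict.get?]
  | cons q t ih =>
    obtain ⟨a, b⟩ := q
    simp only [List.map_cons, List.nodup_cons, List.mem_map] at hnd
    have iht := ih hnd.2
    simp only [PySem.Dict.get?] at iht ⊢
    by_cases hk : a = k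
    · subst hk
      have hnone : ∀ (l : List (Int × ν)), (∀ p ∈ l, p ∈ t) →
          List.find? (fun p => p.1 == a) l = none := by
        intro l hl
        rw [List.find?_eq_none]
        intro p hp
        have : ¬ (p.1 = a) := fun hc => hnd.1 ⟨p, hl p hp, hc⟩
        simpa using this
      cases hq : pred (a, b)
      · rw [List.filter_cons_of_neg (by simp [hq])]
        rw [hnone _ (fun p hp => List.mem_of_mem_filter hp)]
        rw [List.find?_cons_of_pos (by simp)]
        simp [hq]
      · rw [List.filter_cons_of_pos (by simp [hq])]
        rw [List.find?_cons_of_pos (by simp), List.find?_cons_of_pos (by simp)]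
        simp [hq]
    · cases hq : pred (a, b)
      · rw [List.filter_cons_of_neg (by simp [hq])]
        rw [List.find?_cons_of_neg (by simp [hk])]
        exact iht
      · rw [List.filter_cons_of_pos (by simp [hq])]
        rw [List.find?_cons_of_neg (by simp [hk]), List.find?_cons_of_neg (by simp [hk])]
        exact iht

theorem ufGet?_append {ν : Type} (items : List (Int × ν)) (k n : Int) (v : ν)
    (hk : ∀ q ∈ items, q.1 ≠ n) :
    (PySem.Dict.mk (items ++ [(n, v)])).get? k =
      if k = n then some v else (PySem.Dict.mk items).get? k := by
  simp only [PySem.Dict.get?, List.find?_append]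
  by_cases hkn : k = n
  · subst hkn
    have hnone : List.find? (fun p => p.1 == k) items = none := by
      rw [List.find?_eq_none]
      intro p hp
      simpa using hk p hp
    rw [hnone]
    simp [List.find?]
  · cases hfind : List.find? (fun p => p.1 == k) items with
    | none =>
      rw [List.find?_cons_of_neg (by simpa using fun h => hkn h.symm)]
      simp [hkn]
    | some p =>
      simp [hkn]

theorem ufGet?_mem {ν : Type} (d : PySem.Dict Int ν) (k : Int) (v : ν)
    (h : d.get? k = some v) : (k, v) ∈ d.items := by
  simp only [PySem.Dict.get?] at h
  cases hfind : List.find? (fun p => p.1 == k) d.items with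
  | none => rw [hfind] at h; simp at h
  | some p =>
    rw [hfind] at h
    simp only [Option.map_some, Option.some.injEq] at h
    have hm := List.mem_of_find?_eq_some hfind
    have hp := List.find?_some hfind
    simp at hp
    cases p
    simp_all

theorem ufFoldl_insert_get? (xs : List Int) (c : PySem.Dict Int Int) (n y : Int) :
    (xs.foldl (fun c x => c.insert x n) c).get? y =
      if y ∈ xs then some n else c.get? y := by
  induction xs generalizing c with
  | nil => simp
  | cons x t ih =>
    simp only [List.foldl_cons, ih, List.mem_cons]
    by_cases hyt : y ∈ t
    · simp [hyt]
    · by_cases hyx : y = x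
      · subst hyx
        simp [hyt, PySem.Dict.get?_insert_self]
      · simp [hyt, hyx, PySem.Dict.get?_insert]

-- pairwise disjointness of B's groups, from the invariant
theorem ufInv_disj (comp : PySem.Dict Int Int) (members : PySem.Dict Int (List Int)) (n : Int)
    (h : ufInv comp members n) :
    ∀ q ∈ members.items, ∀ q' ∈ members.items, q.1 ≠ q'.1 → ∀ y, y ∈ q.2 → y ∉ q'.2 := by
  obtain ⟨hnd, -, -, h4⟩ := h
  intro q hq q' hq' hne y hy hy'
  obtain ⟨qk, qv⟩ := q
  obtain ⟨qk', qv'⟩ := q'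
  have hk : (members.keys).Nodup := by simpa [PySem.Dict.keys] using hnd
  have h1 : members.get? qk = some qv :=
    PySem.Dict.get?_of_mem_items _ hq hk
  have h2 : members.get? qk' = some qv' :=
    PySem.Dict.get?_of_mem_items _ hq' hk
  have hc1 : comp.get? y = some qk := (h4 y qk).mpr ⟨qv, h1, hy⟩
  have hc2 : comp.get? y = some qk' := (h4 y qk').mpr ⟨qv', h2, hy'⟩
  rw [hc1] at hc2
  exact hne (by simpa using hc2)

theorem ufInv_pairwise (comp : PySem.Dict Int Int) (members : PySem.Dict Int (List Int)) (n : Int)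
    (h : ufInv comp members n) :
    (members.items.map ufMapF).Pairwise (fun g g' => ∀ y, y ∈ g → y ∉ g') := by
  have hp : members.items.Pairwise (fun a b => a.1 ≠ b.1) := List.pairwise_map.mp h.1
  have hdisj := ufInv_disj comp members n h
  have hp2 : members.items.Pairwise (fun q q' => ∀ y, y ∈ q.2 → y ∉ q'.2) :=
    hp.imp_of_mem (fun hq hq' hne => hdisj _ hq _ hq' hne)
  rw [List.pairwise_map]
  refine hp2.imp ?_
  intro q q' hqq y hy hy'
  rw [ufMapF, ufSorted, PySem.List.mem_sorted] at hy hy'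
  exact hqq y hy hy' 

-- characterization of A's inner loop
theorem ufAFold (col : List Int) (L acc : List (List Int)) (S : PySem.Set Int)
    (hnd : S.Nodup)
    (hmem : ∀ g ∈ L, ∀ x ∈ g, (x ∈ S ↔ x ∈ col))
    (hpw : L.Pairwise (fun g g' => ∀ y, y ∈ g → y ∉ g')) :
    (L.foldl aInner (acc, S)).1 =
        acc ++ L.filter (fun g => PySem.Set.isdisjoint (PySem.Set.ofList g) (PySem.Set.ofList col)) ∧
    (L.foldl aInner (acc, S)).2.Nodup ∧
    (∀ y, y ∈ (L.foldl aInner (acc, S)).2 ↔ y ∈ S ∨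
        ∃ g ∈ L, PySem.Set.isdisjoint (PySem.Set.ofList g) (PySem.Set.ofList col) = false ∧ y ∈ g) := by
  induction L generalizing acc S with
  | nil => exact ⟨by simp, hnd, by intro y; simp⟩
  | cons g L' ih =>
    obtain ⟨hpw1, hpw2⟩ := List.pairwise_cons.mp hpw
    have hgS : PySem.Set.isdisjoint (PySem.Set.ofList g) S =
        PySem.Set.isdisjoint (PySem.Set.ofList g) (PySem.Set.ofList col) :=
      ufDisj_right g S (PySem.Set.ofList col) (fun x hx => by
        rw [PySem.Set.mem_ofList]; exact hmem g (List.mem_cons_self) x hx)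
    simp only [List.foldl_cons]
    cases hcase : PySem.Set.isdisjoint (PySem.Set.ofList g) (PySem.Set.ofList col) with
    | true =>
      have hstep : aInner (acc, S) g = (acc ++ [g], S) := by
        simp [aInner, hgS, hcase]
      rw [hstep]
      have hmem' : ∀ g' ∈ L', ∀ x ∈ g', (x ∈ S ↔ x ∈ col) :=
        fun g' hg' x hx => hmem g' (List.mem_cons_of_mem _ hg') x hx
      obtain ⟨e1, e2, e3⟩ := ih (acc ++ [g]) S hnd hmem' hpw2
      refine ⟨?_, e2, ?_⟩
      · rw [e1, List.filter_cons_of_pos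
          (p := fun g => PySem.Set.isdisjoint (PySem.Set.ofList g) (PySem.Set.ofList col)) hcase]
        simp [List.append_assoc]
      · intro y
        rw [e3 y]
        constructor
        · rintro (hy | ⟨g', hg', hf, hy⟩)
          · exact Or.inl hy
          · exact Or.inr ⟨g', List.mem_cons_of_mem _ hg', hf, hy⟩
        · rintro (hy | ⟨g', hg', hf, hy⟩)
          · exact Or.inl hy
          · rcases List.mem_cons.mp hg' with rfl | hg''
            · rw [hcase] at hf; cases hf
            · exact Or.inr ⟨g', hg'', hf, hy⟩
    | false =>
      have hstep : aInner (acc, S) g = (acc, PySem.Set.update S g) := by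
        simp [aInner, hgS, hcase]
      rw [hstep]
      have hnd' : (PySem.Set.update S g).Nodup := PySem.Set.nodup_update _ _ hnd
      have hmem' : ∀ g' ∈ L', ∀ x ∈ g', (x ∈ PySem.Set.update S g ↔ x ∈ col) := by
        intro g' hg' x hx
        rw [PySem.Set.mem_update]
        have hxg : x ∉ g := fun hxg => hpw1 g' hg' x hxg hx
        have := hmem g' (List.mem_cons_of_mem _ hg') x hx
        tauto
      obtain ⟨e1, e2, e3⟩ := ih acc (PySem.Set.update S g) hnd' hmem' hpw2
      refine ⟨?_, e2, ?_⟩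
      · rw [e1, List.filter_cons_of_neg
          (p := fun g => PySem.Set.isdisjoint (PySem.Set.ofList g) (PySem.Set.ofList col))
          (by simp [hcase])]
      · intro y
        rw [e3 y, PySem.Set.mem_update]
        constructor
        · rintro ((hy | hy) | ⟨g', hg', hf, hy⟩)
          · exact Or.inl hy
          · exact Or.inr ⟨g, List.mem_cons_self, hcase, hy⟩
          · exact Or.inr ⟨g', List.mem_cons_of_mem _ hg', hf, hy⟩
        · rintro (hy | ⟨g', hg', hf, hy⟩)
          · exact Or.inl (Or.inl hy)
          · rcases List.mem_cons.mp hg' with rfl | hg''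
            · exact Or.inl (Or.inr hy)
            · exact Or.inr ⟨g', hg'', hf, hy⟩


theorem ufKeep_congr_notmem (x : Int) (q : Int × List Int) (p : List Int) (hx : x ∉ q.2) :
    ufKeep (p ++ [x]) q = ufKeep p q := by
  rw [Bool.eq_iff_iff, ufKeep_true_iff, ufKeep_true_iff]
  constructor
  · intro h y hy hc
    exact h y hy (List.mem_append_left _ hc)
  · intro h y hy hc
    rcases List.mem_append.mp hc with hc | hc
    · exact h y hy hc
    · rw [List.mem_singleton] at hc
      exact hx (hc ▸ hy)

theorem ufKeep_mono_false (x : Int) (q : Int × List Int) (p : List Int)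
    (h : ufKeep p q = false) : ufKeep (p ++ [x]) q = false := by
  rw [ufKeep_false_iff] at h ⊢
  obtain ⟨y, hy, hm⟩ := h
  exact ⟨y, hy, List.mem_append_left _ hm⟩

theorem ufKeep_append_false_of_mem (x : Int) (q : Int × List Int) (p : List Int)
    (hx : x ∈ q.2) : ufKeep (p ++ [x]) q = false := by
  rw [ufKeep_false_iff]
  exact ⟨x, hx, List.mem_append_right _ (List.mem_singleton.mpr rfl)⟩

theorem ufKeyUnique {ν : Type} (items : List (Int × ν)) (hnd : (items.map (·.1)).Nodup)
    (q q' : Int × ν) (hq : q ∈ items) (hq' : q' ∈ items) (hk : q.1 = q'.1) : q = q' := by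
  have h1 : (PySem.Dict.mk items).get? q.1 = some q.2 :=
    PySem.Dict.get?_of_mem_items _ (by simpa using hq) (by simpa [PySem.Dict.keys] using hnd)
  have h2 : (PySem.Dict.mk items).get? q'.1 = some q'.2 :=
    PySem.Dict.get?_of_mem_items _ (by simpa using hq') (by simpa [PySem.Dict.keys] using hnd)
  rw [← hk] at h2
  rw [h1] at h2
  obtain ⟨a, b⟩ := q
  obtain ⟨a', b'⟩ := q'
  simp at hk h2
  simp [hk, h2]

theorem ufMemLabel (comp0 : PySem.Dict Int Int) (members0 : PySem.Dict Int (List Int)) (n : Int)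
    (hInv : ufInv comp0 members0 n) (q : Int × List Int) (hq : q ∈ members0.items) (x : Int)
    (hx : x ∈ q.2) : comp0.get? x = some q.1 := by
  refine (hInv.2.2.2 x q.1).mpr ⟨q.2, ?_, hx⟩
  exact PySem.Dict.get?_of_mem_items _ (by simpa using hq) (by simpa [PySem.Dict.keys] using hInv.1)

theorem ufGet?_none {ν : Type} (d : PySem.Dict Int ν) (k : Int)
    (h : ∀ q ∈ d.items, q.1 ≠ k) : d.get? k = none := by
  simp only [PySem.Dict.get?]
  rw [List.find?_eq_none.mpr]
  · rfl
  · intro q hq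
    simpa using h q hq

-- B's inner loop: one step preserves ufMid
theorem ufMid_step (comp0 : PySem.Dict Int Int) (members0 : PySem.Dict Int (List Int)) (n : Int)
    (hInv : ufInv comp0 members0 n) (p : List Int)
    (st : PySem.Dict Int Int × PySem.Dict Int (List Int) × List Int)
    (hMid : ufMid comp0 members0 n p st) (x : Int) :
    ufMid comp0 members0 n (p ++ [x]) (bInner n st x) := by
  obtain ⟨c, m, grp⟩ := st
  obtain ⟨hM1, hM2, hM3, hM4⟩ := hMid
  simp only at hM1 hM2 hM3 hM4
  have hmemx : ∀ y ∈ p ++ [x], y ∈ p ∨ y = x := by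
    intro y hy
    rcases List.mem_append.mp hy with hy | hy
    · exact Or.inl hy
    · exact Or.inr (List.mem_singleton.mp hy)
  cases hcx : c.get? x with
  | none =>
    -- x is brand new: comp0 has no entry and x ∉ p
    have h := hM2 x
    rw [hcx] at h
    have hc0x : comp0.get? x = none := by
      by_cases hcond : x ∈ p ∧ comp0.get? x = none
      · exact hcond.2
      · rw [if_neg hcond] at h; exact h.symm
    have hxp : x ∉ p := by
      intro hxp
      rw [if_pos ⟨hxp, hc0x⟩] at h
      cases h
    have hnotin : ∀ q ∈ members0.items, x ∉ q.2 := by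
      intro q hq hxq
      rw [ufMemLabel comp0 members0 n hInv q hq x hxq] at hc0x
      cases hc0x
    have hxgrp : x ∉ grp := by
      intro hxg
      rcases (hM4 x).mp hxg with ⟨hxp', -⟩ | ⟨q, hq, -, hxq⟩
      · exact hxp hxp'
      · exact hnotin q hq hxq
    simp only [bInner, hcx]
    refine ⟨?_, ?_, ?_, ?_⟩
    · show m.items = _
      rw [hM1]
      exact List.filter_congr (fun q hq => (ufKeep_congr_notmem x q p (hnotin q hq)).symm)
    · intro y
      show (c.insert x n).get? y = _
      simp only [PySem.Dict.get?_insert]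
      by_cases hyx : y = x
      · subst hyx
        rw [if_pos rfl, if_pos ⟨List.mem_append_right _ (List.mem_singleton.mpr rfl), hc0x⟩]
      · rw [if_neg hyx, hM2 y]
        by_cases hcond : y ∈ p ∧ comp0.get? y = none
        · rw [if_pos hcond, if_pos ⟨List.mem_append_left _ hcond.1, hcond.2⟩]
        · rw [if_neg hcond, if_neg (fun hc =>
            hcond ⟨(hmemx y hc.1).resolve_right (fun hh => hyx hh), hc.2⟩)]
    · show (grp ++ [x]).Nodup
      refine List.Nodup.append hM3 (List.nodup_singleton x) ?_
      intro a ha hax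
      simp only [List.mem_singleton] at hax
      exact hxgrp (hax ▸ ha)
    · intro y
      show y ∈ grp ++ [x] ↔ _
      rw [List.mem_append, List.mem_singleton, hM4 y]
      constructor
      · rintro ((⟨hyp, hc⟩ | ⟨q, hq, hk, hyq⟩) | rfl)
        · exact Or.inl ⟨List.mem_append_left _ hyp, hc⟩
        · exact Or.inr ⟨q, hq, ufKeep_mono_false x q p hk, hyq⟩
        · exact Or.inl ⟨List.mem_append_right _ (List.mem_singleton.mpr rfl), hc0x⟩
      · rintro (⟨hyp, hc⟩ | ⟨q, hq, hk, hyq⟩)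
        · rcases hmemx y hyp with hyp' | rfl
          · exact Or.inl (Or.inl ⟨hyp', hc⟩)
          · exact Or.inr rfl
        · rw [ufKeep_congr_notmem x q p (hnotin q hq)] at hk
          exact Or.inl (Or.inr ⟨q, hq, hk, hyq⟩)
  | some l =>
    have h := hM2 x
    rw [hcx] at h
    by_cases hcond : x ∈ p ∧ comp0.get? x = none
    · -- x was a new element earlier in this column: l = n, nothing happens
      rw [if_pos hcond] at h
      have hln : l = n := by cases h; rfl
      subst hln
      have hnotin : ∀ q ∈ members0.items, x ∉ q.2 := by
        intro q hq hxq
        rw [ufMemLabel comp0 members0 _ hInv q hq x hxq] at hcond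
        exact absurd hcond.2 (by simp)
      have hmget : m.get? l = none := by
        apply ufGet?_none
        intro q hq
        rw [hM1] at hq
        exact ne_of_lt (hInv.2.1 q (List.mem_of_mem_filter hq))
      simp only [bInner, hcx, PySem.Dict.pop?, hmget, Option.map_none]
      refine ⟨?_, ?_, ?_, ?_⟩
      · show m.items = _
        rw [hM1]
        exact List.filter_congr (fun q hq => (ufKeep_congr_notmem x q p (hnotin q hq)).symm)
      · intro y
        show c.get? y = _
        rw [hM2 y]
        by_cases hcond' : y ∈ p ∧ comp0.get? y = none
        · rw [if_pos hcond', if_pos ⟨List.mem_append_left _ hcond'.1, hcond'.2⟩]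
        · rw [if_neg hcond']
          by_cases hyx : y = x
          · subst hyx
            exact absurd hcond hcond'
          · rw [if_neg (fun hc =>
              hcond' ⟨(hmemx y hc.1).resolve_right (fun hh => hyx hh), hc.2⟩)]
      · exact hM3
      · intro y
        show y ∈ grp ↔ _
        rw [hM4 y]
        constructor
        · rintro (⟨hyp, hc⟩ | ⟨q, hq, hk, hyq⟩)
          · exact Or.inl ⟨List.mem_append_left _ hyp, hc⟩
          · exact Or.inr ⟨q, hq, ufKeep_mono_false x q p hk, hyq⟩
        · rintro (⟨hyp, hc⟩ | ⟨q, hq, hk, hyq⟩)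
          · rcases hmemx y hyp with hyp' | rfl
            · exact Or.inl ⟨hyp', hc⟩
            · exact Or.inl ⟨hcond.1, hc⟩
          · rw [ufKeep_congr_notmem x q p (hnotin q hq)] at hk
            exact Or.inr ⟨q, hq, hk, hyq⟩
    · -- comp0 knows x: it lies in the group labelled l
      rw [if_neg hcond] at h
      have hc0x : comp0.get? x = some l := h.symm
      obtain ⟨g, hg, hxg⟩ := (hInv.2.2.2 x l).mp hc0x
      have hlg : (l, g) ∈ members0.items := ufGet?_mem members0 l g hg
      have hkeyuniq : ∀ q ∈ members0.items, x ∈ q.2 → q = (l, g) := by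
        intro q hq hxq
        have := ufMemLabel comp0 members0 n hInv q hq x hxq
        rw [hc0x] at this
        exact ufKeyUnique members0.items hInv.1 q (l, g) hq hlg (by cases this; rfl)
      have hmg : m.get? l =
          if ufKeep p (l, g) then some g else none := by
        have hm : m = PySem.Dict.mk (members0.items.filter (ufKeep p)) := by
          apply PySem.Dict.ext
          exact hM1
        rw [hm, ufGet?_filter members0.items (ufKeep p) l hInv.1]
        have : (PySem.Dict.mk members0.items).get? l = members0.get? l := rfl
        rw [this, hg]
        rfl
      cases hkeep : ufKeep p (l, g) with
      | true =>
        -- the group of x is still present: it is absorbed now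
        rw [hkeep] at hmg
        simp only [if_true] at hmg
        simp only [bInner, hcx, PySem.Dict.pop?, hmg, Option.map_some]
        have hgnd : g.Nodup := hInv.2.2.1 (l, g) hlg
        have hgdisj : ∀ y ∈ g, y ∉ grp := by
          intro y hy hygrp
          rcases (hM4 y).mp hygrp with ⟨-, hc⟩ | ⟨q, hq, hk, hyq⟩
          · rw [ufMemLabel comp0 members0 n hInv (l, g) hlg y hy] at hc
            cases hc
          · have h1 := ufMemLabel comp0 members0 n hInv (l, g) hlg y hy
            have h2 := ufMemLabel comp0 members0 n hInv q hq y hyq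
            rw [h1] at h2
            have : q = (l, g) :=
              ufKeyUnique members0.items hInv.1 q (l, g) hq hlg (by cases h2; rfl)
            rw [this, hkeep] at hk
            cases hk
        have hkeyonly : ∀ q ∈ members0.items, q.1 = l → q = (l, g) := by
          intro q hq hql
          exact ufKeyUnique members0.items hInv.1 q (l, g) hq hlg hql
        refine ⟨?_, ?_, ?_, ?_⟩
        · show (m.erase l).items = _
          have herase : (m.erase l).items = m.items.filter (fun q => !(q.1 == l)) := rfl
          rw [herase, hM1, List.filter_filter]
          apply List.filter_congr
          intro q hq
          by_cases hxq : x ∈ q.2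
          · have hql : q = (l, g) := hkeyuniq q hq hxq
            subst hql
            rw [ufKeep_append_false_of_mem x (l, g) p hxg, hkeep]
            simp
          · have hql : q.1 ≠ l := by
              intro hc
              exact hxq ((hkeyonly q hq hc) ▸ hxg)
            rw [ufKeep_congr_notmem x q p hxq]
            simp [hql]
        · intro y
          show c.get? y = _
          rw [hM2 y]
          by_cases hcond' : y ∈ p ∧ comp0.get? y = none
          · rw [if_pos hcond', if_pos ⟨List.mem_append_left _ hcond'.1, hcond'.2⟩]
          · rw [if_neg hcond']
            by_cases hyx : y = x
            · subst hyx
              rw [if_neg (fun hc => by rw [hc0x] at hc; cases hc.2)]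
            · rw [if_neg (fun hc =>
                hcond' ⟨(hmemx y hc.1).resolve_right (fun hh => hyx hh), hc.2⟩)]
        · show (grp ++ g).Nodup
          refine List.Nodup.append hM3 hgnd ?_
          intro a ha hag
          exact hgdisj a hag ha
        · intro y
          show y ∈ grp ++ g ↔ _
          rw [List.mem_append, hM4 y]
          constructor
          · rintro ((⟨hyp, hc⟩ | ⟨q, hq, hk, hyq⟩) | hyg)
            · exact Or.inl ⟨List.mem_append_left _ hyp, hc⟩
            · exact Or.inr ⟨q, hq, ufKeep_mono_false x q p hk, hyq⟩
            · exact Or.inr ⟨(l, g), hlg, ufKeep_append_false_of_mem x (l, g) p hxg, hyg⟩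
          · rintro (⟨hyp, hc⟩ | ⟨q, hq, hk, hyq⟩)
            · rcases hmemx y hyp with hyp' | rfl
              · exact Or.inl (Or.inl ⟨hyp', hc⟩)
              · rw [hc0x] at hc; cases hc
            · by_cases hxq : x ∈ q.2
              · have hql : q = (l, g) := hkeyuniq q hq hxq
                subst hql
                exact Or.inr hyq
              · rw [ufKeep_congr_notmem x q p hxq] at hk
                exact Or.inl (Or.inr ⟨q, hq, hk, hyq⟩)
      | false =>
        -- the group of x was already absorbed earlier in this column
        rw [hkeep] at hmg
        simp only [Bool.false_eq_true, if_false] at hmg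
        simp only [bInner, hcx, PySem.Dict.pop?, hmg, Option.map_none]
        have hcongr : ∀ q ∈ members0.items, ufKeep (p ++ [x]) q = ufKeep p q := by
          intro q hq
          by_cases hxq : x ∈ q.2
          · rw [hkeyuniq q hq hxq]
            rw [ufKeep_append_false_of_mem x (l, g) p hxg, hkeep]
          · exact ufKeep_congr_notmem x q p hxq
        refine ⟨?_, ?_, ?_, ?_⟩
        · show m.items = _
          rw [hM1]
          exact List.filter_congr (fun q hq => (hcongr q hq).symm)
        · intro y
          show c.get? y = _
          rw [hM2 y]
          by_cases hcond' : y ∈ p ∧ comp0.get? y = none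
          · rw [if_pos hcond', if_pos ⟨List.mem_append_left _ hcond'.1, hcond'.2⟩]
          · rw [if_neg hcond']
            by_cases hyx : y = x
            · subst hyx
              rw [if_neg (fun hc => by rw [hc0x] at hc; cases hc.2)]
            · rw [if_neg (fun hc =>
                hcond' ⟨(hmemx y hc.1).resolve_right (fun hh => hyx hh), hc.2⟩)]
        · exact hM3
        · intro y
          show y ∈ grp ↔ _
          rw [hM4 y]
          constructor
          · rintro (⟨hyp, hc⟩ | ⟨q, hq, hk, hyq⟩)
            · exact Or.inl ⟨List.mem_append_left _ hyp, hc⟩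
            · exact Or.inr ⟨q, hq, ufKeep_mono_false x q p hk, hyq⟩
          · rintro (⟨hyp, hc⟩ | ⟨q, hq, hk, hyq⟩)
            · rcases hmemx y hyp with hyp' | rfl
              · exact Or.inl ⟨hyp', hc⟩
              · rw [hc0x] at hc; cases hc
            · rw [hcongr q hq] at hk
              exact Or.inr ⟨q, hq, hk, hyq⟩

theorem ufMid_fold (comp0 : PySem.Dict Int Int) (members0 : PySem.Dict Int (List Int)) (n : Int)
    (hInv : ufInv comp0 members0 n) (r : List Int) : ∀ (p : List Int)
    (st : PySem.Dict Int Int × PySem.Dict Int (List Int) × List Int),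
    ufMid comp0 members0 n p st →
    ufMid comp0 members0 n (p ++ r) (r.foldl (bInner n) st) := by
  induction r with
  | nil => intro p st h; simpa using h
  | cons x r' ih =>
    intro p st h
    have h1 := ufMid_step comp0 members0 n hInv p st h x
    have h2 := ih (p ++ [x]) (bInner n st x) h1
    simpa [List.append_assoc] using h2

theorem ufMid_init (comp0 : PySem.Dict Int Int) (members0 : PySem.Dict Int (List Int)) (n : Int) :
    ufMid comp0 members0 n [] (comp0, members0, []) := by
  refine ⟨?_, ?_, List.nodup_nil, ?_⟩
  · symm
    rw [List.filter_eq_self]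
    intro q hq
    rw [ufKeep_true_iff]
    intro x hx hc
    simp at hc
  · intro y; simp
  · intro y
    simp [ufKeep_false_iff]

-- one column: B's state step matches A's group-list step, and the invariant is preserved
theorem ufStep (col : List Int) (comp : PySem.Dict Int Int)
    (members : PySem.Dict Int (List Int)) (n : Int) (hInv : ufInv comp members n) :
    aStep (members.items.map ufMapF) col =
        (bStep (comp, members, n) col).2.1.items.map ufMapF ∧
    ufInv (bStep (comp, members, n) col).1 (bStep (comp, members, n) col).2.1
        (bStep (comp, members, n) col).2.2 := by
  have hMid := ufMid_fold comp members n hInv col [] (comp, members, []) (ufMid_init comp members n)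
  rw [List.nil_append] at hMid
  obtain ⟨hM1, hM2, hM3, hM4⟩ := hMid
  obtain ⟨hInv1, hInv2, hInv3, hInv4⟩ := hInv
  -- name B's inner-loop result
  have hbeq : bStep (comp, members, n) col =
      ((col.foldl (bInner n) (comp, members, [])).2.2.foldl
          (fun c x => c.insert x n) (col.foldl (bInner n) (comp, members, [])).1,
        (col.foldl (bInner n) (comp, members, [])).2.1.insert n
          (col.foldl (bInner n) (comp, members, [])).2.2,
        n + 1) := rfl
  generalize hRdef : col.foldl (bInner n) (comp, members, []) = R at hbeq hM1 hM2 hM3 hM4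
  obtain ⟨c', m', grp⟩ := R
  simp only at hbeq hM1 hM2 hM3 hM4
  rw [hbeq]
  -- the members entries all carry labels < n, so inserting n appends
  have hm'sub : ∀ q ∈ m'.items, q ∈ members.items := by
    intro q hq; rw [hM1] at hq; exact List.mem_of_mem_filter hq
  have hm'lt : ∀ q ∈ m'.items, q.1 < n := fun q hq => hInv2 q (hm'sub q hq)
  have hcont : m'.contains n = false := by
    rw [← Bool.not_eq_true, PySem.Dict.contains]
    simp only [List.any_eq_true, not_exists, not_and]
    intro q hq
    simp only [beq_iff_eq]
    exact ne_of_lt (hm'lt q hq)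
  have hitems : (m'.insert n grp).items = m'.items ++ [(n, grp)] := by
    simp [PySem.Dict.insert, hcont]
  -- A's inner loop, characterized
  have hpw := ufInv_pairwise comp members n ⟨hInv1, hInv2, hInv3, hInv4⟩
  have hmemS : ∀ g ∈ members.items.map ufMapF, ∀ x ∈ g,
      (x ∈ PySem.Set.ofList col ↔ x ∈ col) :=
    fun g _ x _ => PySem.Set.mem_ofList col x
  obtain ⟨ha1, ha2, ha3⟩ := ufAFold col (members.items.map ufMapF) [] (PySem.Set.ofList col)
    (PySem.Set.nodup_ofList col) hmemS hpw
  -- the dropped/kept test agrees on an entry and its sorted image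
  have hpred : ∀ q ∈ members.items,
      PySem.Set.isdisjoint (PySem.Set.ofList (ufMapF q)) (PySem.Set.ofList col) = ufKeep col q := by
    intro q _
    unfold ufKeep
    exact ufDisj_congr (ufMapF q) q.2 (PySem.Set.ofList col)
      (fun x => by rw [ufMapF, ufSorted, PySem.List.mem_sorted])
  have hfm : (members.items.map ufMapF).filter
        (fun g => PySem.Set.isdisjoint (PySem.Set.ofList g) (PySem.Set.ofList col)) =
      (members.items.filter (ufKeep col)).map ufMapF := by
    rw [List.filter_map]
    apply congrArg
    apply List.filter_congr
    intro q hq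
    simpa using hpred q hq
  -- membership in A's merged set = membership in B's merged group
  have hsetmem : ∀ y,
      (y ∈ ((members.items.map ufMapF).foldl aInner ([], PySem.Set.ofList col)).2) ↔ y ∈ grp := by
    intro y
    rw [ha3 y, hM4 y, PySem.Set.mem_ofList]
    constructor
    · rintro (hy | ⟨g, hgm, hf, hy⟩)
      · cases hcy : comp.get? y with
        | none => exact Or.inl ⟨hy, rfl⟩
        | some l =>
          obtain ⟨g, hg, hyg⟩ := (hInv4 y l).mp hcy
          have hlg := ufGet?_mem members l g hg
          refine Or.inr ⟨(l, g), hlg, ?_, hyg⟩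
          rw [ufKeep_false_iff]
          exact ⟨y, hyg, hy⟩
      · obtain ⟨q, hq, rfl⟩ := List.mem_map.mp hgm
        rw [hpred q hq] at hf
        rw [ufMapF, ufSorted, PySem.List.mem_sorted] at hy
        exact Or.inr ⟨q, hq, hf, hy⟩
    · rintro (⟨hy, -⟩ | ⟨q, hq, hf, hy⟩)
      · exact Or.inl hy
      · refine Or.inr ⟨ufMapF q, List.mem_map_of_mem hq, ?_, ?_⟩
        · rw [hpred q hq]; exact hf
        · rw [ufMapF, ufSorted, PySem.List.mem_sorted]; exact hy
  have hsort : ufSorted ((members.items.map ufMapF).foldl aInner ([], PySem.Set.ofList col)).2 =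
      ufSorted grp := by
    unfold ufSorted
    apply PySem.List.sorted_eq_sorted_of_perm _ _ _ (fun a b h => h)
    rw [List.perm_ext_iff_of_nodup ha2 hM3]
    exact hsetmem
  constructor
  · -- the two column steps agree
    show aStep (members.items.map ufMapF) col = _
    unfold aStep
    simp only [hitems, List.map_append, List.map_cons, List.map_nil]
    rw [ha1, hfm, hM1, hsort]
    simp [ufMapF]
  · -- the invariant is re-established
    have hmembers'' : m'.insert n grp = PySem.Dict.mk (m'.items ++ [(n, grp)]) :=
      PySem.Dict.ext hitems
    have hm'dict : m' = PySem.Dict.mk (members.items.filter (ufKeep col)) := PySem.Dict.ext hM1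
    have hget'' : ∀ l', (m'.insert n grp).get? l' =
        if l' = n then some grp else m'.get? l' := by
      intro l'
      rw [hmembers'', ufGet?_append m'.items l' n grp (fun q hq => ne_of_lt (hm'lt q hq))]
    have hgetm' : ∀ l', m'.get? l' =
        (members.get? l').bind (fun v => if ufKeep col (l', v) then some v else none) := by
      intro l'
      rw [hm'dict, ufGet?_filter members.items (ufKeep col) l' hInv1]
    have hcomp'' : ∀ y, (grp.foldl (fun c x => c.insert x n) c').get? y =
        if y ∈ grp then some n else c'.get? y := fun y => ufFoldl_insert_get? grp c' n y
    refine ⟨?_, ?_, ?_, ?_⟩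
    · show ((m'.insert n grp).items.map (·.1)).Nodup
      rw [hitems, List.map_append]
      refine List.Nodup.append ?_ (by simp) ?_
      · rw [hM1]
        exact hInv1.sublist (List.filter_sublist.map _)
      · intro a ha hax
        simp only [List.map_cons, List.map_nil, List.mem_singleton] at hax
        obtain ⟨q, hq, rfl⟩ := List.mem_map.mp ha
        exact ne_of_lt (hm'lt q hq) hax
    · show ∀ q ∈ (m'.insert n grp).items, q.1 < n + 1
      rw [hitems]
      intro q hq
      rcases List.mem_append.mp hq with hq | hq
      · exact lt_trans (hm'lt q hq) (by omega)
      · rw [List.mem_singleton] at hq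
        subst hq
        omega
    · show ∀ q ∈ (m'.insert n grp).items, q.2.Nodup
      rw [hitems]
      intro q hq
      rcases List.mem_append.mp hq with hq | hq
      · exact hInv3 q (hm'sub q hq)
      · rw [List.mem_singleton] at hq
        subst hq
        exact hM3
    · intro y l'
      show (grp.foldl (fun c x => c.insert x n) c').get? y = some l' ↔ _
      rw [hcomp'', hget'' l']
      by_cases hygrp : y ∈ grp
      · rw [if_pos hygrp]
        constructor
        · intro hl'
          have hln : l' = n := by cases hl'; rfl
          subst hln
          rw [if_pos rfl]
          exact ⟨grp, rfl, hygrp⟩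
        · rintro ⟨g', hg', hyg'⟩
          by_cases hl'n : l' = n
          · subst hl'n; rfl
          · rw [if_neg hl'n, hgetm' l'] at hg'
            cases hgm : members.get? l' with
            | none => rw [hgm] at hg'; cases hg'
            | some g0 =>
              rw [hgm] at hg'
              simp only [Option.bind_some] at hg'
              have hkeep : ufKeep col (l', g0) = true := by
                by_contra hc
                rw [if_neg (by simpa using hc)] at hg'
                cases hg'
              rw [if_pos hkeep] at hg'
              have hg0 : g0 = g' := by cases hg'; rfl
              subst hg0
              have hl'mem := ufGet?_mem members l' g0 hgm
              rcases (hM4 y).mp hygrp with ⟨hyc, -⟩ | ⟨q, hq, hk, hyq⟩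
              · rw [ufKeep_true_iff] at hkeep
                exact absurd hyc (hkeep y hyg')
              · have h1 := ufMemLabel comp members n ⟨hInv1, hInv2, hInv3, hInv4⟩ q hq y hyq
                have h2 := ufMemLabel comp members n ⟨hInv1, hInv2, hInv3, hInv4⟩ (l', g0) hl'mem y hyg'
                rw [h1] at h2
                have := ufKeyUnique members.items hInv1 q (l', g0) hq hl'mem (by cases h2; rfl)
                rw [this, hkeep] at hk
                cases hk
      · rw [if_neg hygrp, hM2 y]
        have hnc : ¬(y ∈ col ∧ comp.get? y = none) := by
          intro hc
          exact hygrp ((hM4 y).mpr (Or.inl hc))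
        rw [if_neg hnc]
        constructor
        · intro hcy
          obtain ⟨g, hg, hyg⟩ := (hInv4 y l').mp hcy
          have hlmem := ufGet?_mem members l' g hg
          have hkeep : ufKeep col (l', g) = true := by
            by_contra hc
            exact hygrp ((hM4 y).mpr (Or.inr ⟨(l', g), hlmem, by simpa using hc, hyg⟩))
          have hl'n : l' ≠ n := ne_of_lt (hInv2 (l', g) hlmem)
          rw [if_neg hl'n, hgetm' l', hg]
          simp only [Option.bind_some]
          rw [if_pos hkeep]
          exact ⟨g, rfl, hyg⟩
        · rintro ⟨g', hg', hyg'⟩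
          by_cases hl'n : l' = n
          · subst hl'n
            rw [if_pos rfl] at hg'
            have : g' = grp := by cases hg'; rfl
            subst this
            exact absurd hyg' hygrp
          · rw [if_neg hl'n, hgetm' l'] at hg'
            cases hgm : members.get? l' with
            | none => rw [hgm] at hg'; cases hg'
            | some g0 =>
              rw [hgm] at hg'
              simp only [Option.bind_some] at hg'
              have hkeep : ufKeep col (l', g0) = true := by
                by_contra hc
                rw [if_neg (by simpa using hc)] at hg'
                cases hg'
              rw [if_pos hkeep] at hg'
              have hg0 : g0 = g' := by cases hg'; rfl
              subst hg0
              exact (hInv4 y l').mpr ⟨g0, hgm, hyg'⟩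

theorem ufMain (cols : List (List Int)) : ∀ (comp : PySem.Dict Int Int)
    (members : PySem.Dict Int (List Int)) (n : Int), ufInv comp members n →
    cols.foldl aStep (members.items.map ufMapF) =
      (cols.foldl bStep (comp, members, n)).2.1.items.map ufMapF := by
  induction cols with
  | nil => intro comp members n _; rfl
  | cons col rest ih =>
    intro comp members n hInv
    have hstep := ufStep col comp members n hInv
    simp only [List.foldl_cons]
    rw [hstep.1]
    have := ih (bStep (comp, members, n) col).1 (bStep (comp, members, n) col).2.1
      (bStep (comp, members, n) col).2.2 hstep.2
    simpa using this

-- ===== VERDICT (by name: the statement is the Claim_ definition above) =====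
theorem sorted_union_find_py_spec : Claim_equal_sorted_union_find_py := by
  intro igs _
  unfold Spec_sorted_union_find_py sorted_union_find_py sorted_union_find_py_alt
  have h0 : ufInv PySem.Dict.empty PySem.Dict.empty 0 := by
    refine ⟨by simp [PySem.Dict.empty], by simp [PySem.Dict.empty], by simp [PySem.Dict.empty], ?_⟩
    intro x l
    simp [PySem.Dict.empty, PySem.Dict.get?]
  have h := ufMain (zipStar igs) PySem.Dict.empty PySem.Dict.empty 0 h0
  show PySem.List.sorted ((zipStar igs).foldl aStep []) (fun x => x) false =
    PySem.List.sorted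
      (((zipStar igs).foldl bStep (PySem.Dict.empty, PySem.Dict.empty, 0)).2.1.values.map ufSorted)
      (fun x => x) false
  congr 1
  have h2 : ((zipStar igs).foldl bStep (PySem.Dict.empty, PySem.Dict.empty, 0)).2.1.values.map ufSorted
      = ((zipStar igs).foldl bStep (PySem.Dict.empty, PySem.Dict.empty, 0)).2.1.items.map ufMapF := by
    simp [PySem.Dict.values, List.map_map]
    intro a b _; rfl
  rw [h2, ← h]
  rfl
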